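-- pv_equiv track=rewrite | github.com/CodingWithMinmer/CodingWithMinmer | 896_monotonic_array/python/variant_896_refactored.py | countMonotonicSequences_improved
-- ===== SOURCE A (Python) =====
-- from enum import Enum
--
-- class Direction(Enum):
--     UNKNOWN = -1,
--     DEC = 0,
--     INC = 1,
--     FLAT = 2
--
-- def countMonotonicSequences_improved(nums):
--     if len(nums) <= 1:
--         return 0
--
--     count = 1 if nums[0] != nums[1] else 0
--     dir = Direction.UNKNOWN
--     for i in range(1,len(nums)):
--         if nums[i] > nums[i - 1]:
--             if dir == Direction.DEC or dir == Direction.FLAT: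
--                 count += 1
--             dir = Direction.INC
--         elif nums[i] < nums[i - 1]:
--             if dir == Direction.INC or dir == Direction.FLAT:
--                 count += 1
--             dir = Direction.DEC
--         else:
--             if dir != Direction.FLAT:
--                 dir = Direction.FLAT
--                 count += 1
--
--     return count
-- ===== SOURCE B (Python) =====
-- def countMonotonicSequences_improved(nums):
--     if len(nums) <= 1:
--         return 0
--     # classify each adjacent pair as -1 / 0 / 1 ...
--     signs = [(nums[i] > nums[i - 1]) - (nums[i] < nums[i - 1]) for i in range(1, len(nums))]
--     # ... then count maximal runs of equal direction: 1 + number of boundaries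
--     return 1 + sum(a != b for a, b in zip(signs, signs[1:]))
-- ===== Notes on version B (the rewrite author's own statement) =====
-- stated objective: simpler
-- what changed: Replaced A's fused single-pass state machine (running Direction enum plus conditional counter) by a two-phase pipeline: first materialize a -1/0/1 sign table of adjacent pairs, then count its maximal runs as 1 + the number of adjacent sign boundaries.
import Mathlib
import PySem

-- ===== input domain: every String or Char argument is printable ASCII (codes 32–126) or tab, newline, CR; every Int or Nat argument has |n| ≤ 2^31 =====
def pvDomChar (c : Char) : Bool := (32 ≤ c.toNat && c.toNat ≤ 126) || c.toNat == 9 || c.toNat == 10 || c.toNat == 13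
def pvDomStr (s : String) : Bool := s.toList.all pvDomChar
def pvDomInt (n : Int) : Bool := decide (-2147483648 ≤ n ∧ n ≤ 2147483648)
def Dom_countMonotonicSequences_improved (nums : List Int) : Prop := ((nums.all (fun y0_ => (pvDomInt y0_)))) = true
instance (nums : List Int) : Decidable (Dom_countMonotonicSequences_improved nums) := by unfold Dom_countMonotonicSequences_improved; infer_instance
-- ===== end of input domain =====

-- B re-implements A as a two-phase pipeline (classify adjacent pairs into a -1/0/1 sign table,
-- then count the table's maximal runs) instead of A's fused running-direction state machine;
-- objective: simpler. Equivalence is exact on all inputs.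

-- ===== PORT A =====
inductive PvDir where
  | unknown | dec | inc | flat
deriving DecidableEq, Repr

def countMonotonicSequences_improved (nums : List Int) : Int :=
  if nums.length ≤ 1 then 0
  else
    let init : Int := if PySem.List.pyGetD nums 0 0 ≠ PySem.List.pyGetD nums 1 0 then 1 else 0
    let st := (PySem.List.pyRange 1 nums.length 1).foldl
      (fun (s : Int × PvDir) i =>
        let (count, dir) := s
        if PySem.List.pyGetD nums i 0 > PySem.List.pyGetD nums (i - 1) 0 then
          (if dir = PvDir.dec ∨ dir = PvDir.flat then count + 1 else count, PvDir.inc)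
        else if PySem.List.pyGetD nums i 0 < PySem.List.pyGetD nums (i - 1) 0 then
          (if dir = PvDir.inc ∨ dir = PvDir.flat then count + 1 else count, PvDir.dec)
        else
          if dir ≠ PvDir.flat then (count + 1, PvDir.flat) else (count, dir))
      (init, PvDir.unknown)
    st.1

-- ===== PORT B =====
def pvSigns (nums : List Int) : List Int :=
  (PySem.List.pyRange 1 nums.length 1).map (fun i =>
    (if PySem.List.pyGetD nums i 0 > PySem.List.pyGetD nums (i - 1) 0 then (1 : Int) else 0)
    - (if PySem.List.pyGetD nums i 0 < PySem.List.pyGetD nums (i - 1) 0 then (1 : Int) else 0))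

def countMonotonicSequences_improved_alt (nums : List Int) : Int :=
  if nums.length ≤ 1 then 0
  else
    let signs := pvSigns nums
    1 + ((signs.zip (PySem.List.slice signs (some 1) none)).map
          (fun p => if p.1 ≠ p.2 then (1 : Int) else 0)).sum

-- ===== PRECONDITION & SPEC =====
def Spec_countMonotonicSequences_improved (nums : List Int) (out : Int) : Prop := out = countMonotonicSequences_improved_alt nums
instance (nums : List Int) (out : Int) : Decidable (Spec_countMonotonicSequences_improved nums out) := by unfold Spec_countMonotonicSequences_improved; infer_instance

-- ===== CLAIM (what is proved, stated in full; the proofs are below) =====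
def Claim_equal_countMonotonicSequences_improved : Prop := ∀ (nums : List Int), Dom_countMonotonicSequences_improved nums → Spec_countMonotonicSequences_improved nums (countMonotonicSequences_improved nums)

-- ===== LEMMAS AND PROOFS =====

/-- The direction A's state machine holds after seeing a pair of sign `s`. -/
def pvDirOf (s : Int) : PvDir :=
  if s = 1 then PvDir.inc else if s = -1 then PvDir.dec else PvDir.flat

/-- A's loop body, rephrased as a step on the sign of the current adjacent pair. -/
def pvStepA (st : Int × PvDir) (s : Int) : Int × PvDir :=
  if s = 1 then
    (if st.2 = PvDir.dec ∨ st.2 = PvDir.flat then st.1 + 1 else st.1, PvDir.inc)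
  else if s = -1 then
    (if st.2 = PvDir.inc ∨ st.2 = PvDir.flat then st.1 + 1 else st.1, PvDir.dec)
  else
    if st.2 ≠ PvDir.flat then (st.1 + 1, PvDir.flat) else st

/-- B's boundary count starting from a previous sign `s`. -/
def pvDiffCount (s : Int) : List Int → Int
  | [] => 0
  | b :: t => (if s ≠ b then 1 else 0) + pvDiffCount b t

theorem pvSign_mem (x p : Int) :
    ((if x > p then (1 : Int) else 0) - (if x < p then (1 : Int) else 0)) = -1 ∨
    ((if x > p then (1 : Int) else 0) - (if x < p then (1 : Int) else 0)) = 0 ∨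
    ((if x > p then (1 : Int) else 0) - (if x < p then (1 : Int) else 0)) = 1 := by
  by_cases h1 : x > p <;> by_cases h2 : x < p <;> simp [h1, h2]

theorem pvStepA_signs (c : Int) (s b : Int)
    (hs : s = -1 ∨ s = 0 ∨ s = 1) (hb : b = -1 ∨ b = 0 ∨ b = 1) :
    pvStepA (c, pvDirOf s) b = (c + (if s ≠ b then 1 else 0), pvDirOf b) := by
  rcases hs with rfl | rfl | rfl <;> rcases hb with rfl | rfl | rfl <;>
    simp [pvStepA, pvDirOf]

theorem pv_foldl_stepA (t : List Int) :
    ∀ (s c : Int), (s = -1 ∨ s = 0 ∨ s = 1) → (∀ b ∈ t, b = -1 ∨ b = 0 ∨ b = 1) →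
      (t.foldl pvStepA (c, pvDirOf s)).1 = c + pvDiffCount s t := by
  induction t with
  | nil => intro s c _ _; simp [pvDiffCount]
  | cons b t ih =>
    intro s c hs hall
    have hb := hall b (List.mem_cons_self ..)
    rw [List.foldl_cons, pvStepA_signs c s b hs hb, pvDiffCount,
      ih b _ hb (fun x hx => hall x (List.mem_cons_of_mem _ hx))]
    ring

theorem pvDiffCount_eq_zipsum (s : Int) (t : List Int) :
    pvDiffCount s t
      = (((s :: t).zip t).map (fun p => if p.1 ≠ p.2 then (1 : Int) else 0)).sum := by
  induction t generalizing s with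
  | nil => simp [pvDiffCount]
  | cons b t ih => simp [pvDiffCount, List.zip, ih b]

theorem pvStepA_init (a b : Int) :
    pvStepA ((if a ≠ b then (1 : Int) else 0), PvDir.unknown)
        ((if b > a then (1 : Int) else 0) - (if b < a then (1 : Int) else 0))
      = (1, pvDirOf ((if b > a then (1 : Int) else 0) - (if b < a then (1 : Int) else 0))) := by
  rcases lt_trichotomy a b with h | h | h
  · simp [pvStepA, pvDirOf, h, ne_of_lt h, not_lt_of_gt h]
  · simp [pvStepA, pvDirOf, h]
  · simp [pvStepA, pvDirOf, h, (ne_of_gt h), not_lt_of_gt h]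

-- ===== VERDICT (by name: the statement is the Claim_ definition above) =====
theorem countMonotonicSequences_improved_spec : Claim_equal_countMonotonicSequences_improved := by
  unfold Claim_equal_countMonotonicSequences_improved Spec_countMonotonicSequences_improved
  intro nums _
  unfold countMonotonicSequences_improved countMonotonicSequences_improved_alt
  by_cases hlen : nums.length ≤ 1
  · simp only [if_pos hlen]
  · simp only [if_neg hlen]
    have h2n : (1 : Int) < nums.length := by exact_mod_cast (by omega : 1 < nums.length)
    -- A's fold over indices is a fold of `pvStepA` over B's sign table
    have hfold :
        (PySem.List.pyRange 1 nums.length 1).foldl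
          (fun (s : Int × PvDir) i =>
            let (count, dir) := s
            if PySem.List.pyGetD nums i 0 > PySem.List.pyGetD nums (i - 1) 0 then
              (if dir = PvDir.dec ∨ dir = PvDir.flat then count + 1 else count, PvDir.inc)
            else if PySem.List.pyGetD nums i 0 < PySem.List.pyGetD nums (i - 1) 0 then
              (if dir = PvDir.inc ∨ dir = PvDir.flat then count + 1 else count, PvDir.dec)
            else
              if dir ≠ PvDir.flat then (count + 1, PvDir.flat) else (count, dir))
          ((if PySem.List.pyGetD nums 0 0 ≠ PySem.List.pyGetD nums 1 0 then (1 : Int) else 0), PvDir.unknown)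
        = (pvSigns nums).foldl pvStepA
          ((if PySem.List.pyGetD nums 0 0 ≠ PySem.List.pyGetD nums 1 0 then (1 : Int) else 0), PvDir.unknown) := by
      rw [pvSigns, List.foldl_map]
      apply PySem.List.foldl_congr_mem
      intro acc i _
      rcases acc with ⟨c, d⟩
      by_cases h1 : PySem.List.pyGetD nums i 0 > PySem.List.pyGetD nums (i - 1) 0 <;>
        by_cases h2 : PySem.List.pyGetD nums i 0 < PySem.List.pyGetD nums (i - 1) 0 <;>
        simp [pvStepA, h1, h2] <;> omega
    have hrange : PySem.List.pyRange 1 (nums.length : Int) 1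
        = 1 :: PySem.List.pyRange 2 (nums.length : Int) 1 := by
      have := PySem.List.pyRange_one_cons h2n
      norm_num at this ⊢
      exact this
    have hsigns : pvSigns nums
        = ((if PySem.List.pyGetD nums 1 0 > PySem.List.pyGetD nums 0 0 then (1 : Int) else 0)
            - (if PySem.List.pyGetD nums 1 0 < PySem.List.pyGetD nums 0 0 then (1 : Int) else 0))
          :: (PySem.List.pyRange 2 (nums.length : Int) 1).map (fun i =>
            (if PySem.List.pyGetD nums i 0 > PySem.List.pyGetD nums (i - 1) 0 then (1 : Int) else 0)
            - (if PySem.List.pyGetD nums i 0 < PySem.List.pyGetD nums (i - 1) 0 then (1 : Int) else 0)) := by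
      rw [pvSigns, hrange, List.map_cons]
      norm_num
    rw [hfold, hsigns, List.foldl_cons, pvStepA_init, PySem.List.slice_from_one,
      List.tail_cons,
      pv_foldl_stepA _ _ 1
        (pvSign_mem (PySem.List.pyGetD nums 1 0) (PySem.List.pyGetD nums 0 0))
        (by
          intro b hb
          simp only [List.mem_map] at hb
          obtain ⟨i, _, rfl⟩ := hb
          exact pvSign_mem (PySem.List.pyGetD nums i 0) (PySem.List.pyGetD nums (i - 1) 0)),
      pvDiffCount_eq_zipsum]
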